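-- pv_equiv track=rewrite | github.com/Therealtobu/NightGuard_Api | ng_antitamper/linecheck.py | inject_linechecks
-- ===== SOURCE A (Python) =====
-- LINE_CHECK_MARKER = "--[[LINECHECK]]"
--
-- def generate_linecheck_lua(expected_line: int, freeze_var: str = "_NG_LC") -> str:
--     """
--     Generate Lua 5.1 compatible line check code.
--     If line number doesn't match expected, freeze execution.
--     """
--     return f"""do
--     local _ok, _e = pcall(error, "", 2)
--     local _ln = _e and tonumber((_e):match(":(%d+):")) or 0
--     if _ln ~= {expected_line} then
--         local _t = {{}}
--         repeat _t[#_t+1] = 0 until #_t > 50000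
--     end
-- end"""
--
-- def inject_linechecks(lua_source: str) -> str:
--     """
--     Find all LINE_CHECK_MARKER in source and replace with
--     actual line number checks.
--     Two-pass: first count lines, then inject.
--     """
--     lines = lua_source.split("\n")
--     result = []
--
--     for i, line in enumerate(lines, 1):
--         if LINE_CHECK_MARKER in line:
--             # The check itself will be on line i
--             # After injection, the check line will be i
--             check = generate_linecheck_lua(i)
--             # Replace marker with check
--             new_line = line.replace(LINE_CHECK_MARKER, check)
--             result.append(new_line)
--         else:
--             result.append(line)
--
--     return "\n".join(result)
-- ===== SOURCE B (Python) =====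
-- LINE_CHECK_MARKER = "--[[LINECHECK]]"
--
-- def generate_linecheck_lua(expected_line: int, freeze_var: str = "_NG_LC") -> str:
--     return f"""do
--     local _ok, _e = pcall(error, "", 2)
--     local _ln = _e and tonumber((_e):match(":(%d+):")) or 0
--     if _ln ~= {expected_line} then
--         local _t = {{}}
--         repeat _t[#_t+1] = 0 until #_t > 50000
--     end
-- end"""
--
-- def inject_linechecks(lua_source: str) -> str:
--     # Single pass: walk the source once, tracking the current line number,
--     # and splice in the check wherever the marker starts.
--     marker = LINE_CHECK_MARKER
--     out = []
--     line = 1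
--     i = 0
--     n = len(lua_source)
--     while i < n:
--         if lua_source.startswith(marker, i):
--             out.append(generate_linecheck_lua(line))
--             i += len(marker)
--         else:
--             c = lua_source[i]
--             if c == "\n":
--                 line += 1
--             out.append(c)
--             i += 1
--     return "".join(out)
-- ===== Notes on version B (the rewrite author's own statement) =====
-- stated objective: alternative
-- what changed: Replaces A's two-phase pipeline (split into lines, enumerate, per-line marker replace, rejoin) with a single character-level scan that keeps a running line counter and splices the generated check in place at each marker occurrence.
import Mathlib
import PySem

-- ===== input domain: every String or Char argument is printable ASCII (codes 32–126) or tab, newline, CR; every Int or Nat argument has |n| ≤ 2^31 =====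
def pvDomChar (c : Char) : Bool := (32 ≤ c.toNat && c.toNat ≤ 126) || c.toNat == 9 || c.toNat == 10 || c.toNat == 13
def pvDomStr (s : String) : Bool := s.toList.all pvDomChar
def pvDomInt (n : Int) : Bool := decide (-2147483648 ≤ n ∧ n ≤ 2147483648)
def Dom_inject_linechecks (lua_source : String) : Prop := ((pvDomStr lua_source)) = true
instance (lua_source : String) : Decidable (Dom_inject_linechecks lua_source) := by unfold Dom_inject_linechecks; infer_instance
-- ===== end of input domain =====

-- B replaces the split/enumerate/replace/join pipeline with one character-level scan
-- that tracks the line number and splices checks in place (objective: alternative).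


-- ===== PORT A =====
def markerChars : List Char := "--[[LINECHECK]]".toList

-- generate_linecheck_lua: the f-string, as char-list concatenation (freeze_var is unused in Python too)
def genChars (expected_line : Int) : List Char :=
  "do\n    local _ok, _e = pcall(error, \"\", 2)\n    local _ln = _e and tonumber((_e):match(\":(%d+):\")) or 0\n    if _ln ~= ".toList
  ++ PySem.Int.toChars expected_line
  ++ " then\n        local _t = {}\n        repeat _t[#_t+1] = 0 until #_t > 50000\n    end\nend".toList

def inject_linechecks (lua_source : String) : String :=
  let lines := PySem.Chars.splitOn lua_source.toList "\n".toList
  let result := (PySem.List.enumerate lines 1).foldl (fun acc p =>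
    if PySem.Chars.isIn markerChars p.2 then
      acc ++ [PySem.Chars.replace p.2 markerChars (genChars p.1)]
    else
      acc ++ [p.2]) []
  String.ofList (PySem.Chars.join "\n".toList result)

-- ===== PORT B =====
-- single scan with a line counter (Source B's while loop, as structural recursion)
def scanB : List Char → Int → List Char
  | [], _ => []
  | c :: rest, line =>
    if markerChars.isPrefixOf (c :: rest) then
      genChars line ++ scanB (List.drop markerChars.length (c :: rest)) line
    else
      c :: scanB rest (if c = '\n' then line + 1 else line)
  termination_by cs _ => cs.length
  decreasing_by
    · simp [markerChars]
    · simp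

def inject_linechecks_alt (lua_source : String) : String :=
  String.ofList (scanB lua_source.toList 1)

-- ===== PRECONDITION & SPEC =====
def Spec_inject_linechecks (lua_source : String) (out : String) : Prop := out = inject_linechecks_alt lua_source
instance (lua_source : String) (out : String) : Decidable (Spec_inject_linechecks lua_source out) := by unfold Spec_inject_linechecks; infer_instance

-- ===== CLAIM (what is proved, stated in full; the proofs are below) =====
def Claim_equal_inject_linechecks : Prop := ∀ (lua_source : String), Dom_inject_linechecks lua_source → Spec_inject_linechecks lua_source (inject_linechecks lua_source)

-- ===== LEMMAS AND PROOFS =====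

-- clean recursion computing Chars.splitOn on sep = ['\n']
def splitF : List Char → List (List Char)
  | [] => [[]]
  | c :: t => if c = '\n' then [] :: splitF t else (c :: (splitF t).headI) :: (splitF t).tail

theorem splitF_ne_nil (l : List Char) : splitF l ≠ [] := by
  cases l with
  | nil => simp [splitF]
  | cons c t => simp only [splitF]; split <;> simp

theorem go_eq_splitF (fuel : Nat) (l cur : List Char) (acc : List (List Char))
    (h : l.length < fuel) :
    PySem.Chars.splitOn.go ['\n'] fuel l cur acc
      = acc.reverse ++ ((cur.reverse ++ (splitF l).headI) :: (splitF l).tail) := by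
  induction fuel generalizing l cur acc with
  | zero => omega
  | succ f ih =>
    cases l with
    | nil => rw [PySem.Chars.splitOn.go.eq_def]; simp [splitF]
    | cons c t =>
      rw [PySem.Chars.splitOn.go.eq_def]
      dsimp only
      by_cases hc : c = '\n'
      · subst hc
        have ht : t.length < f := by simpa using h
        rw [if_pos (by simp [List.isPrefixOf] : List.isPrefixOf ['\n'] ('\n' :: t) = true)]
        rw [show List.drop (['\n'] : List Char).length ('\n' :: t) = t from rfl]
        rw [ih _ _ _ ht]
        rcases hsp : splitF t with _ | ⟨a, ls⟩
        · exact absurd hsp (splitF_ne_nil t)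
        · simp [splitF, hsp]
      · have hpre : List.isPrefixOf ['\n'] (c :: t) = false := by
          simp [List.isPrefixOf]
          exact fun h' => absurd h'.symm hc
        have ht : t.length < f := by
          have := h; simp at this; omega
        rw [if_neg (by simp [hpre])]
        rw [ih _ _ _ ht]
        simp [splitF, hc]

theorem splitOn_eq_splitF (l : List Char) :
    PySem.Chars.splitOn l "\n".toList = splitF l := by
  unfold PySem.Chars.splitOn
  rw [show ("\n".toList : List Char) = ['\n'] by decide]
  rw [go_eq_splitF _ _ _ _ (by omega)]
  rcases hsp : splitF l with _ | ⟨a, ls⟩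
  · exact absurd hsp (splitF_ne_nil l)
  · simp

theorem splitF_no_nl {l : List Char} (h : '\n' ∉ l) : splitF l = [l] := by
  induction l with
  | nil => rfl
  | cons c t ih =>
    simp only [List.mem_cons, not_or] at h
    simp [splitF, Ne.symm h.1, ih h.2]

theorem splitF_append {line rest : List Char} (h : '\n' ∉ line) :
    splitF (line ++ '\n' :: rest) = line :: splitF rest := by
  induction line with
  | nil => simp [splitF]
  | cons c t ih =>
    simp only [List.mem_cons, not_or] at h
    simp [splitF, Ne.symm h.1, ih h.2]

theorem replace_go_eq_scanB (fuel : Nat) (l acc : List Char) (n : Int)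
    (hf : l.length ≤ fuel) (hl : '\n' ∉ l) :
    PySem.Chars.replace.go markerChars (genChars n) fuel l acc
      = acc.reverse ++ scanB l n := by
  induction fuel generalizing l acc with
  | zero =>
    have hnil : l = [] := by cases l with
      | nil => rfl
      | cons c t => simp at hf
    subst hnil
    rw [PySem.Chars.replace.go.eq_def]; simp [scanB]
  | succ f ih =>
    cases l with
    | nil => rw [PySem.Chars.replace.go.eq_def]; simp [scanB]
    | cons c t =>
      rw [PySem.Chars.replace.go.eq_def]; dsimp only
      by_cases hp : markerChars.isPrefixOf (c :: t) = true
      · rw [if_pos hp]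
        have hd : (List.drop markerChars.length (c :: t)).length ≤ f := by
          have : markerChars.length = 15 := by decide
          simp only [List.length_drop, this, List.length_cons]
          simp only [List.length_cons] at hf
          omega
        have hd2 : '\n' ∉ List.drop markerChars.length (c :: t) :=
          fun hm => hl (List.mem_of_mem_drop hm)
        rw [ih _ _ hd hd2]
        rw [show scanB (c :: t) n = genChars n ++ scanB (List.drop markerChars.length (c :: t)) n from by
          rw [scanB]; rw [if_pos hp]]
        simp
      · rw [if_neg hp]
        have hc : c ≠ '\n' := fun hh => hl (by simp [hh])
        have ht : t.length ≤ f := by simp only [List.length_cons] at hf; omega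
        have ht2 : '\n' ∉ t := fun hm => hl (List.mem_cons_of_mem _ hm)
        rw [ih _ _ ht ht2]
        rw [show scanB (c :: t) n = c :: scanB t n from by
          rw [scanB]; rw [if_neg hp]; simp [hc]]
        simp

theorem replace_eq_scanB {l : List Char} (n : Int) (hl : '\n' ∉ l) :
    PySem.Chars.replace l markerChars (genChars n) = scanB l n := by
  unfold PySem.Chars.replace
  rw [if_neg (by decide : ¬ markerChars.isEmpty = true)]
  rw [replace_go_eq_scanB _ _ _ _ le_rfl hl]
  simp

theorem replace_go_id (new : List Char) (fuel : Nat) (l acc : List Char)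
    (hf : l.length ≤ fuel) (h : ¬ markerChars <:+: l) :
    PySem.Chars.replace.go markerChars new fuel l acc = acc.reverse ++ l := by
  induction fuel generalizing l acc with
  | zero =>
    have hnil : l = [] := by cases l with
      | nil => rfl
      | cons c t => simp at hf
    subst hnil
    rw [PySem.Chars.replace.go.eq_def]
  | succ f ih =>
    cases l with
    | nil => rw [PySem.Chars.replace.go.eq_def]; simp
    | cons c t =>
      rw [PySem.Chars.replace.go.eq_def]; dsimp only
      have hp : ¬ markerChars.isPrefixOf (c :: t) = true := by
        intro hp
        exact h (List.IsPrefix.isInfix (List.isPrefixOf_iff_prefix.mp hp))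
      rw [if_neg hp]
      have ht : t.length ≤ f := by simp only [List.length_cons] at hf; omega
      have ht2 : ¬ markerChars <:+: t := fun hi => h (hi.trans (List.suffix_cons c t).isInfix)
      rw [ih _ _ ht ht2]
      simp

theorem replace_not_in {l : List Char} (n : Int)
    (h : PySem.Chars.isIn markerChars l = false) :
    PySem.Chars.replace l markerChars (genChars n) = l := by
  rw [PySem.Chars.isIn_eq_false_iff] at h
  unfold PySem.Chars.replace
  rw [if_neg (by decide : ¬ markerChars.isEmpty = true)]
  rw [replace_go_id _ _ _ _ le_rfl h]
  simp

theorem marker_expand : markerChars = ['-','-','[','[','L','I','N','E','C','H','E','C','K',']',']'] := by decide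

theorem prefix_line {line rest : List Char}
    (hp : markerChars <+: (line ++ '\n' :: rest)) : markerChars <+: line := by
  rcases Nat.lt_or_ge line.length markerChars.length with hlt | hle
  case inr => exact List.prefix_of_prefix_length_le hp (List.prefix_append _ _) hle
  case inl =>
    exfalso
    have h2 : line <+: markerChars :=
      List.prefix_of_prefix_length_le (List.prefix_append _ _) hp (le_of_lt hlt)
    obtain ⟨u, hu⟩ := h2
    obtain ⟨s, hs⟩ := hp
    have hus : u ++ s = '\n' :: rest := by
      rw [← hu] at hs
      simpa using hs
    cases u with
    | nil =>
      have : line.length = markerChars.length := by rw [← hu]; simp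
      omega
    | cons a u' =>
      have ha : a = '\n' := by
        have := hus
        simp at this
        exact this.1
      have : a ∈ markerChars := by rw [← hu]; simp
      rw [ha, marker_expand] at this
      simp at this

theorem scanB_append_aux (k : Nat) : ∀ (line rest : List Char) (n : Int),
    line.length ≤ k → '\n' ∉ line →
    scanB (line ++ '\n' :: rest) n = scanB line n ++ '\n' :: scanB rest (n + 1) := by
  induction k with
  | zero =>
    intro line rest n hk _
    have : line = [] := by cases line with
      | nil => rfl
      | cons c t => simp at hk
    subst this
    simp only [List.nil_append]
    have hpf : markerChars.isPrefixOf ('\n' :: rest) = false := by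
      rw [marker_expand]; simp [List.isPrefixOf]
    rw [show scanB ('\n' :: rest) n = '\n' :: scanB rest (n + 1) from by
      rw [scanB]; rw [if_neg (by simp [hpf])]; simp]
    simp [scanB]
  | succ k ih =>
    intro line rest n hk hl
    cases line with
    | nil =>
      simp only [List.nil_append]
      have hpf : markerChars.isPrefixOf ('\n' :: rest) = false := by
        rw [marker_expand]; simp [List.isPrefixOf]
      rw [show scanB ('\n' :: rest) n = '\n' :: scanB rest (n + 1) from by
        rw [scanB]; rw [if_neg (by simp [hpf])]; simp]
      simp [scanB]
    | cons c t =>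
      by_cases hp : markerChars.isPrefixOf ((c :: t) ++ '\n' :: rest) = true
      · have hpl : markerChars <+: (c :: t) :=
          prefix_line (List.isPrefixOf_iff_prefix.mp hp)
        have hplb : markerChars.isPrefixOf (c :: t) = true := List.isPrefixOf_iff_prefix.mpr hpl
        have hlen15 : markerChars.length ≤ (c :: t).length := hpl.length_le
        have hdrop : List.drop markerChars.length ((c :: t) ++ '\n' :: rest)
            = List.drop markerChars.length (c :: t) ++ '\n' :: rest :=
          List.drop_append_of_le_length hlen15
        have hdk : (List.drop markerChars.length (c :: t)).length ≤ k := by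
          have h15 : markerChars.length = 15 := by decide
          simp only [List.length_drop, h15, List.length_cons]
          simp only [List.length_cons] at hk
          omega
        have hdl : '\n' ∉ List.drop markerChars.length (c :: t) :=
          fun hm => hl (List.mem_of_mem_drop hm)
        rw [show scanB ((c :: t) ++ '\n' :: rest) n
            = genChars n ++ scanB (List.drop markerChars.length ((c :: t) ++ '\n' :: rest)) n from by
          rw [List.cons_append, scanB]
          rw [if_pos (by rw [← List.cons_append]; exact hp)]]
        rw [hdrop, ih _ _ _ hdk hdl]
        rw [show scanB (c :: t) n = genChars n ++ scanB (List.drop markerChars.length (c :: t)) n from by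
          rw [scanB]; rw [if_pos hplb]]
        simp
      · have hplb : markerChars.isPrefixOf (c :: t) = false := by
          rcases hb : markerChars.isPrefixOf (c :: t) with _ | _
          · rfl
          · exact absurd (List.isPrefixOf_iff_prefix.mpr
              ((List.isPrefixOf_iff_prefix.mp hb).trans (List.prefix_append _ _))) (by simpa using hp)
        have hc : c ≠ '\n' := fun hh => hl (by simp [hh])
        have htl : '\n' ∉ t := fun hm => hl (List.mem_cons_of_mem _ hm)
        have htk : t.length ≤ k := by simp only [List.length_cons] at hk; omega
        rw [show scanB ((c :: t) ++ '\n' :: rest) n = c :: scanB (t ++ '\n' :: rest) n from by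
          rw [List.cons_append, scanB]
          rw [if_neg (by rw [← List.cons_append]; simpa using hp)]
          simp [hc]]
        rw [ih _ _ _ htk htl]
        rw [show scanB (c :: t) n = c :: scanB t n from by
          rw [scanB]; rw [if_neg (by simp [hplb])]; simp [hc]]
        simp

theorem foldl_app (f : Int × List Char → List Char) (l : List (Int × List Char))
    (init : List (List Char)) :
    l.foldl (fun acc p => acc ++ [f p]) init = init ++ l.map f := by
  induction l generalizing init with
  | nil => simp
  | cons x xs ih => simp [List.foldl, ih]

theorem main_eq (cs : List Char) (n : Int) :
    scanB cs n
      = PySem.Chars.join "\n".toList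
          ((PySem.List.enumerate (splitF cs) n).map
            (fun p => PySem.Chars.replace p.2 markerChars (genChars p.1))) := by
  have key : ∀ (k : Nat) (cs : List Char) (n : Int), cs.length ≤ k →
      scanB cs n
        = PySem.Chars.join "\n".toList
            ((PySem.List.enumerate (splitF cs) n).map
              (fun p => PySem.Chars.replace p.2 markerChars (genChars p.1))) := by
    intro k
    induction k with
    | zero =>
      intro cs n hk
      have : cs = [] := by cases cs with
        | nil => rfl
        | cons c t => simp at hk
      subst this
      rw [splitF, PySem.List.enumerate_cons, PySem.List.enumerate_nil]
      simp only [List.map]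
      rw [PySem.Chars.join_singleton]
      rw [replace_eq_scanB n (by simp)]
    | succ k ih =>
      intro cs n hk
      by_cases hmem : '\n' ∈ cs
      · have hdne : List.dropWhile (fun c => c != '\n') cs ≠ [] := by
          simp only [ne_eq, List.dropWhile_eq_nil_iff]
          push Not
          exact ⟨'\n', hmem, by simp⟩
        have hhead : (List.dropWhile (fun c => c != '\n') cs).head hdne = '\n' := by
          have := List.head_dropWhile_not (p := fun c => c != '\n') (l := cs) hdne
          simpa using this
        set line := List.takeWhile (fun c => c != '\n') cs with hline
        set rest := (List.dropWhile (fun c => c != '\n') cs).tail with hrest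
        have hdw : List.dropWhile (fun c => c != '\n') cs = '\n' :: rest := by
          have h0 := List.cons_head_tail hdne
          rw [hhead] at h0
          exact h0.symm
        have hsplit : cs = line ++ '\n' :: rest := by
          rw [hline, ← hdw]
          exact (List.takeWhile_append_dropWhile).symm
        have hnl : '\n' ∉ line := by
          intro hm
          have := List.mem_takeWhile_imp hm
          simp at this
        have hrlen : rest.length ≤ k := by
          have := hk
          rw [hsplit] at this
          simp only [List.length_append, List.length_cons] at this
          omega
        rw [hsplit]
        rw [scanB_append_aux line.length line rest n le_rfl hnl]
        rw [← replace_eq_scanB n hnl]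
        rw [splitF_append hnl]
        rcases hsp : splitF rest with _ | ⟨a, ls⟩
        · exact absurd hsp (splitF_ne_nil rest)
        · rw [show ("\n".toList : List Char) = ['\n'] by decide]
          simp only [PySem.List.enumerate_cons, List.map]
          rw [PySem.Chars.join_cons_cons]
          rw [ih rest (n + 1) hrlen]
          rw [hsp]
          rw [show ("\n".toList : List Char) = ['\n'] by decide]
          simp [PySem.List.enumerate_cons]
      · rw [splitF_no_nl hmem, PySem.List.enumerate_cons, PySem.List.enumerate_nil]
        simp only [List.map]
        rw [PySem.Chars.join_singleton]
        rw [replace_eq_scanB n hmem]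
  exact key cs.length cs n le_rfl

-- ===== VERDICT (by name: the statement is the Claim_ definition above) =====
theorem inject_linechecks_spec : Claim_equal_inject_linechecks := by
  intro s _
  unfold Spec_inject_linechecks inject_linechecks inject_linechecks_alt
  simp only
  congr 1
  rw [splitOn_eq_splitF]
  rw [show (fun (acc : List (List Char)) (p : Int × List Char) =>
        if PySem.Chars.isIn markerChars p.2 = true then
          acc ++ [PySem.Chars.replace p.2 markerChars (genChars p.1)]
        else acc ++ [p.2])
      = fun acc p => acc ++ [if PySem.Chars.isIn markerChars p.2 = true then
          PySem.Chars.replace p.2 markerChars (genChars p.1) else p.2] from by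
    funext acc p; split <;> rfl]
  rw [foldl_app]
  rw [main_eq]
  congr 1
  apply List.map_congr_left
  intro p _
  rcases hin : PySem.Chars.isIn markerChars p.2 with _ | _
  · simp only [Bool.false_eq_true, if_false]
    rw [replace_not_in p.1 hin]
  · simp
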